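-- pv_equiv track=rewrite | github.com/edt-yxz-zzd/python3_src | nn_ns/txt/direct_translate.py | direct_translate
-- ===== SOURCE A (Python) =====
-- import bisect
--
-- def match_one_word(sorted_list_of_word_lengths, translation_table, sentence, start):
--     ls = sorted_list_of_word_lengths
--     R = len(sentence) - start
--     t = bisect.bisect_right(ls, R)
--     assert all(R < L for L in ls[t:])
--
--     for L in reversed(ls[:t]):
--         assert 0 < L <= R
--         old_word = sentence[start : start+L]
--         new_word = translation_table.get(old_word, None)
--         if new_word is not None:
--             new_start = start + L
--
--             return old_word, new_word, new_start
--
--     return None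
--
-- def direct_translate(translation_table, sentence, start = 0):
--     ls = dict2sorted_list_of_word_lengths(translation_table)
--     new_words = []
--     old_words = []
--
--     while True:
--         r = match_one_word(ls, translation_table, sentence, start)
--         if r is None:
--             break
--         old_word, new_word, start = r
--         new_words.append(new_word)
--         old_words.append(old_word)
--
--     return old_words, new_words, start
--
-- def dict2sorted_list_of_word_lengths(d):
--     ls = list(set(map(len, d.keys())))
--     ls.sort()
--     return ls
-- ===== SOURCE B (Python) =====
-- def direct_translate(translation_table, sentence, start=0):
--     # single scan of the table per position, keeping the longest matching key
--     old_words = []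
--     new_words = []
--     n = len(sentence)
--     i = start
--     while 0 <= i < n:
--         best_old = None
--         best_new = None
--         for old, new in translation_table.items():
--             if (best_old is None or len(old) > len(best_old)) and old and sentence.startswith(old, i):
--                 best_old, best_new = old, new
--         if best_old is None:
--             break
--         old_words.append(best_old)
--         new_words.append(best_new)
--         i += len(best_old)
--     return old_words, new_words, i
-- ===== Notes on version B (the rewrite author's own statement) =====
-- stated objective: simpler
-- what changed: A precomputes the sorted set of distinct key lengths and, at each position, bisects it by the remaining length and probes the dict once per candidate length from the longest down; B drops that machinery entirely and instead makes one pass over the table per position, keeping the longest nonempty key that matches at the current index.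
-- intended difference: On a negative start at which some table key equals a candidate slice, A translates words via Python's negative-slice wraparound and returns them with an advanced start, while B, as intended for an out-of-range position, translates nothing and returns ([], [], start) unchanged. — e.g. on direct_translate([("a", "X")], "ab", -2): A returns (["a"], ["X"], -1), B returns ([], [], -2)
import Mathlib
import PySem

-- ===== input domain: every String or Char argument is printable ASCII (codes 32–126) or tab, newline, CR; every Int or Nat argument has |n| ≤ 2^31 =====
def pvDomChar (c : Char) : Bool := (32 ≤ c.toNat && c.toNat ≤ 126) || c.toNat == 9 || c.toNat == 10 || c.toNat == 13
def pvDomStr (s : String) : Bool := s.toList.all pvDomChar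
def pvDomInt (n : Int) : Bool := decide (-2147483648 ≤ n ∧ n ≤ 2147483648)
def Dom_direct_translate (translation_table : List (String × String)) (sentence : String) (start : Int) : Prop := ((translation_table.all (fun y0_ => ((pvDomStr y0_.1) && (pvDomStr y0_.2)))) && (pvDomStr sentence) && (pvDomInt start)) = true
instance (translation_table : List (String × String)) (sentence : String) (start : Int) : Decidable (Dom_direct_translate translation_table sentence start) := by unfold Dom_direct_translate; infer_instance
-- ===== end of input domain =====

-- B replaces A's sorted-distinct-lengths + bisect + per-length dict lookups by one scan of the
-- table per position keeping the longest matching key (objective: simpler; no speed claim).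

-- ===== PORT A =====

-- match_one_word: candidate key lengths not exceeding the remaining slice, longest first;
-- the first dict hit wins
def pvMatchOneWord (ls : List Int) (table : List (String × String)) (sentence : String) (start : Int) :
    Option (String × String × Int) :=
  let R : Int := PySem.Str.len sentence - start
  let t : Nat := PySem.List.bisectRight ls R
  ((ls.take t).reverse).findSome? (fun L =>
    let oldWord : String := PySem.Str.slice sentence (some start) (some (start + L))
    match (PySem.Dict.mk table).get? oldWord with
    | some newWord => some (oldWord, newWord, start + L)
    | none => none)

-- dict2sorted_list_of_word_lengths: sorted(set(map(len, d.keys())))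
def pvSortedLens (table : List (String × String)) : List Int :=
  PySem.List.sorted (PySem.Set.ofList (table.map (fun p => PySem.Str.len p.1))) (fun x => x)

-- the 'while True' loop of A; the fuel only makes the recursion structural (inside Pre_ every
-- match advances start by at least 1, so the fuel is never exhausted)
def pvDtLoop : Nat → List Int → List (String × String) → String → List String → List String → Int →
    List String × List String × Int
  | 0, _, _, _, olds, news, start => (olds, news, start)
  | fuel + 1, ls, table, sentence, olds, news, start =>
    match pvMatchOneWord ls table sentence start with
    | none => (olds, news, start)
    | some (o, nw, s') => pvDtLoop fuel ls table sentence (olds ++ [o]) (news ++ [nw]) s'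

def direct_translate (translation_table : List (String × String)) (sentence : String) (start : Int) :
    List String × List String × Int :=
  pvDtLoop ((PySem.Str.len sentence).toNat + start.natAbs + 2) (pvSortedLens translation_table)
    translation_table sentence [] [] start

-- ===== PORT B =====

-- one pass over the table, keeping the strictly longest nonempty key matching at position i
-- (sentence.startswith(old, i) with 0 <= i < n is: old is a prefix of the characters from i on)
def pvBestMatch (table : List (String × String)) (sentence : String) (i : Int) :
    Option (String × String) :=
  table.foldl (fun best p =>
    if ((match best with
         | none => true
         | some b => decide (PySem.Str.len b.1 < PySem.Str.len p.1)) &&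
        (!(p.1 == "")) &&
        PySem.Chars.startswith (sentence.toList.drop i.toNat) p.1.toList) = true
    then some p else best) none

-- the 'while 0 <= i < n' loop of B; the fuel only makes the recursion structural (every matched
-- key is nonempty, so i advances by at least 1 and the fuel is never exhausted)
def pvAltLoop : Nat → List (String × String) → String → List String → List String → Int →
    List String × List String × Int
  | 0, _, _, olds, news, i => (olds, news, i)
  | fuel + 1, table, sentence, olds, news, i =>
    if 0 ≤ i ∧ i < PySem.Str.len sentence then
      match pvBestMatch table sentence i with
      | none => (olds, news, i)
      | some (o, nw) => pvAltLoop fuel table sentence (olds ++ [o]) (news ++ [nw]) (i + PySem.Str.len o)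
    else (olds, news, i)

def direct_translate_alt (translation_table : List (String × String)) (sentence : String) (start : Int) :
    List String × List String × Int :=
  pvAltLoop ((PySem.Str.len sentence).toNat + start.natAbs + 2) translation_table sentence [] [] start

-- ===== PRECONDITION & SPEC =====

-- Pre_ excludes exactly the inputs on which A raises: with an empty-string key in the table and
-- start <= len(sentence), A's 'assert 0 < L' fails (AssertionError) at the first position with no
-- positive-length match, and A always reaches such a position.
def Pre_direct_translate (translation_table : List (String × String)) (sentence : String) (start : Int) : Prop :=
  (∀ p ∈ translation_table, p.1 ≠ "") ∨ PySem.Str.len sentence < start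

instance (translation_table : List (String × String)) (sentence : String) (start : Int) :
    Decidable (Pre_direct_translate translation_table sentence start) := by
  unfold Pre_direct_translate; infer_instance

def pvWitness_direct_translate : (List (String × String)) × String × Int := ([("a", "X")], "ab", 0)

-- On a negative start at which some key equals a candidate slice, A translates words via Python's
-- negative-slice wraparound and returns them with an advanced start, while B, as intended for an
-- out-of-range position, translates nothing and returns ([], [], start) unchanged.
def D_direct_translate (translation_table : List (String × String)) (sentence : String) (start : Int) : Prop :=
  start < 0 ∧ ∃ p1 ∈ translation_table, ∃ p2 ∈ translation_table,
    PySem.Str.len p2.1 ≤ PySem.Str.len sentence - start ∧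
    PySem.Str.slice sentence (some start) (some (start + PySem.Str.len p2.1)) = p1.1

instance (translation_table : List (String × String)) (sentence : String) (start : Int) :
    Decidable (D_direct_translate translation_table sentence start) := by
  unfold D_direct_translate; infer_instance

def Spec_direct_translate (translation_table : List (String × String)) (sentence : String) (start : Int)
    (out : List String × List String × Int) : Prop :=
  ¬ D_direct_translate translation_table sentence start →
    out = direct_translate_alt translation_table sentence start

instance (translation_table : List (String × String)) (sentence : String) (start : Int)
    (out : List String × List String × Int) : Decidable (Spec_direct_translate translation_table sentence start out) := by
  unfold Spec_direct_translate; infer_instance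

def pvDiffWitness_direct_translate : (List (String × String)) × String × Int := ([("a", "X")], "ab", -2)

def pvDiffWitnessOut_direct_translate :
    (List String × List String × Int) × (List String × List String × Int) :=
  ((["a"], ["X"], -1), ([], [], -2))

-- ===== CLAIM (what is proved, stated in full; the proofs are below) =====

def Claim_unchanged_direct_translate : Prop := ∀ (translation_table : List (String × String)) (sentence : String) (start : Int), Dom_direct_translate translation_table sentence start → Pre_direct_translate translation_table sentence start → Spec_direct_translate translation_table sentence start (direct_translate translation_table sentence start)

def Claim_changed_direct_translate : Prop := Dom_direct_translate (pvDiffWitness_direct_translate.1) (pvDiffWitness_direct_translate.2.1) (pvDiffWitness_direct_translate.2.2) ∧ Pre_direct_translate (pvDiffWitness_direct_translate.1) (pvDiffWitness_direct_translate.2.1) (pvDiffWitness_direct_translate.2.2) ∧ D_direct_translate (pvDiffWitness_direct_translate.1) (pvDiffWitness_direct_translate.2.1) (pvDiffWitness_direct_translate.2.2) ∧ direct_translate (pvDiffWitness_direct_translate.1) (pvDiffWitness_direct_translate.2.1) (pvDiffWitness_direct_translate.2.2) = pvDiffWitnessOut_direct_translate.1 ∧ direct_translate_alt (pvDiffWitness_direct_translate.1)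 (pvDiffWitness_direct_translate.2.1) (pvDiffWitness_direct_translate.2.2) = pvDiffWitnessOut_direct_translate.2 ∧ pvDiffWitnessOut_direct_translate.1 ≠ pvDiffWitnessOut_direct_translate.2

def Claim_exact_direct_translate : Prop := ∀ (translation_table : List (String × String)) (sentence : String) (start : Int), Dom_direct_translate translation_table sentence start → Pre_direct_translate translation_table sentence start → D_direct_translate translation_table sentence start → direct_translate translation_table sentence start ≠ direct_translate_alt translation_table sentence start

-- ===== LEMMAS AND PROOFS =====

def pvMatches (sentence : String) (i : Int) (k : String) : Bool :=
  (!(k == "")) && PySem.Chars.startswith (sentence.toList.drop i.toNat) k.toList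

def pvFL (sentence : String) (i : Int) : List (String × String) → Option (String × String)
  | [] => none
  | p :: rest =>
    let r := pvFL sentence i rest
    if (pvMatches sentence i p.1 &&
        (match r with
         | none => true
         | some q => decide (q.1.length ≤ p.1.length))) = true
    then some p else r

def pvComb : Option (String × String) → Option (String × String) → Option (String × String)
  | none, r => r
  | some a, none => some a
  | some a, some q => if a.1.length < q.1.length then some q else some a

theorem pvMatchOneWord_def (ls : List Int) (table : List (String × String)) (sentence : String)
    (start : Int) : pvMatchOneWord ls table sentence start =
    ((ls.take (PySem.List.bisectRight ls (PySem.Str.len sentence - start))).reverse).findSome?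
      (fun L =>
        match (PySem.Dict.mk table).get? (PySem.Str.slice sentence (some start) (some (start + L))) with
        | some newWord => some (PySem.Str.slice sentence (some start) (some (start + L)), newWord, start + L)
        | none => none) := rfl

theorem pvFoldl_comb (sentence : String) (i : Int) (l : List (String × String)) :
    ∀ acc, l.foldl (fun best p =>
    if ((match best with
         | none => true
         | some b => decide (PySem.Str.len b.1 < PySem.Str.len p.1)) &&
        (!(p.1 == "")) &&
        PySem.Chars.startswith (sentence.toList.drop i.toNat) p.1.toList) = true
    then some p else best) acc = pvComb acc (pvFL sentence i l) := by
  induction l with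
  | nil => intro acc; cases acc <;> rfl
  | cons p rest ih =>
    intro acc
    have hM : ∀ k : String, ((!(k == "")) && PySem.Chars.startswith (sentence.toList.drop i.toNat) k.toList) = pvMatches sentence i k := fun _ => rfl
    rw [List.foldl_cons, ih, pvFL]
    simp only [Bool.and_assoc, hM]
    by_cases hm : pvMatches sentence i p.1 = true
    · cases hr : pvFL sentence i rest with
      | none =>
        cases acc with
        | none => simp [pvComb, hm]
        | some a =>
          by_cases ha : a.1.length < p.1.length <;>
            simp [pvComb, hm, ha]
      | some q =>
        cases acc with
        | none =>
          by_cases hq : q.1.length ≤ p.1.length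
          · have h2 : ¬ p.1.length < q.1.length := by omega
            simp [pvComb, hm, hq, h2]
          · have h2 : p.1.length < q.1.length := by omega
            simp [pvComb, hm, hq, h2]
        | some a =>
          by_cases ha : a.1.length < p.1.length <;>
          by_cases hq : q.1.length ≤ p.1.length
          · have h2 : ¬ p.1.length < q.1.length := by omega
            simp [pvComb, hm, ha, hq, h2]
          · have h2 : p.1.length < q.1.length := by omega
            have h3 : a.1.length < q.1.length := by omega
            simp [pvComb, hm, ha, hq, h2, h3]
          · have h2 : ¬ a.1.length < q.1.length := by omega
            simp [pvComb, hm, ha, hq, h2]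
          · simp [pvComb, hm, ha, hq]
    · simp only [Bool.not_eq_true] at hm
      simp [hm, pvComb]

theorem pvBestMatch_eq_pvFL (table : List (String × String)) (sentence : String) (i : Int) :
    pvBestMatch table sentence i = pvFL sentence i table := by
  rw [pvBestMatch, pvFoldl_comb]
  cases pvFL sentence i table <;> rfl

theorem pvFL_eq_none_iff (sentence : String) (i : Int) (table : List (String × String)) :
    pvFL sentence i table = none ↔ ∀ p ∈ table, pvMatches sentence i p.1 = false := by
  induction table with
  | nil => simp [pvFL]
  | cons p rest ih =>
    rw [pvFL]
    by_cases hm : pvMatches sentence i p.1 = true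
    · cases hr : pvFL sentence i rest with
      | none =>
        exact iff_of_false (by simp [hm])
          (by intro h; have := h p List.mem_cons_self; simp [this] at hm)
      | some r =>
        exact iff_of_false (by split_ifs <;> simp)
          (by intro h; have := h p List.mem_cons_self; simp [this] at hm)
    · simp only [Bool.not_eq_true] at hm
      simp [hm, ih]

theorem pvFL_eq_some (sentence : String) (i : Int) (table : List (String × String))
    (pr : String × String) (h : pvFL sentence i table = some pr) :
    pr ∈ table ∧ pvMatches sentence i pr.1 = true ∧
      (∀ q ∈ table, pvMatches sentence i q.1 = true → q.1.length ≤ pr.1.length) := by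
  induction table generalizing pr with
  | nil => simp [pvFL] at h
  | cons p rest ih =>
    rw [pvFL] at h
    by_cases hm : pvMatches sentence i p.1 = true
    · cases hr : pvFL sentence i rest with
      | none =>
        rw [hr] at h
        simp [hm] at h
        subst h
        refine ⟨List.mem_cons_self, hm, ?_⟩
        intro q hq hmq
        rcases List.mem_cons.mp hq with rfl | hq
        · exact le_refl _
        · exact absurd ((pvFL_eq_none_iff sentence i rest).mp hr q hq) (by simp [hmq])
      | some r =>
        rw [hr] at h
        obtain ⟨hrmem, hrm, hrmax⟩ := ih r hr
        by_cases hl : r.1.length ≤ p.1.length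
        · simp [hm, hl] at h
          subst h
          refine ⟨List.mem_cons_self, hm, ?_⟩
          intro q hq hmq
          rcases List.mem_cons.mp hq with rfl | hq
          · exact le_refl _
          · exact le_trans (hrmax q hq hmq) hl
        · simp [hm, hl] at h
          subst h
          refine ⟨List.mem_cons_of_mem _ hrmem, hrm, ?_⟩
          intro q hq hmq
          rcases List.mem_cons.mp hq with rfl | hq
          · omega
          · exact hrmax q hq hmq
    · simp only [Bool.not_eq_true] at hm
      simp only [hm] at h
      simp at h
      obtain ⟨hrmem, hrm, hrmax⟩ := ih pr h
      refine ⟨List.mem_cons_of_mem _ hrmem, hrm, ?_⟩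
      intro q hq hmq
      rcases List.mem_cons.mp hq with rfl | hq
      · rw [hmq] at hm; cases hm
      · exact hrmax q hq hmq

theorem pvFL_first (sentence : String) (i : Int) (table : List (String × String))
    (pr : String × String) (h : pvFL sentence i table = some pr) :
    (PySem.Dict.mk table).get? pr.1 = some pr.2 := by
  induction table generalizing pr with
  | nil => simp [pvFL] at h
  | cons p rest ih =>
    rw [pvFL] at h
    rw [PySem.Dict.get?_mk_cons]
    by_cases hm : pvMatches sentence i p.1 = true
    · cases hr : pvFL sentence i rest with
      | none =>
        rw [hr] at h
        simp [hm] at h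
        subst h
        simp
      | some r =>
        rw [hr] at h
        by_cases hl : r.1.length ≤ p.1.length
        · simp [hm, hl] at h
          subst h
          simp
        · simp [hm, hl] at h
          subst h
          have hne : (p.1 == r.1) = false := by
            rw [beq_eq_false_iff_ne]
            intro he
            have : r.1.length ≤ p.1.length := by rw [← he]
            exact hl this
          rw [hne]
          rw [if_neg Bool.false_ne_true]
          exact ih r hr
    · simp only [Bool.not_eq_true] at hm
      simp only [hm] at h
      simp at h
      have hrs := pvFL_eq_some sentence i rest pr (by simpa using h)
      have hne : (p.1 == pr.1) = false := by
        rw [beq_eq_false_iff_ne]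
        intro he
        have hmr : pvMatches sentence i pr.1 = true := hrs.2.1
        rw [← he] at hmr
        rw [hmr] at hm
        cases hm
      rw [hne]
      rw [if_neg Bool.false_ne_true]
      exact ih pr h

theorem pvMatches_iff (sentence : String) (i : Int) (k : String) :
    pvMatches sentence i k = true ↔ k ≠ "" ∧ k.toList <+: sentence.toList.drop i.toNat := by
  simp [pvMatches, PySem.Chars.startswith_iff]

theorem pvMem_sortedLens (table : List (String × String)) (L : Int) :
    L ∈ pvSortedLens table ↔ ∃ p ∈ table, PySem.Str.len p.1 = L := by
  simp [pvSortedLens, PySem.List.mem_sorted, PySem.Set.mem_ofList]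

theorem pvSortedLens_nonneg (table : List (String × String)) (L : Int)
    (h : L ∈ pvSortedLens table) : 0 ≤ L := by
  rw [pvMem_sortedLens] at h
  obtain ⟨p, _, rfl⟩ := h
  simp [PySem.Str.len_eq]

theorem pvSortedLens_pairwise (table : List (String × String)) :
    (pvSortedLens table).Pairwise (· < ·) :=
  PySem.List.sorted_ofList_pairwise_lt _

theorem pvTake_bisect_le (xs : List Int) (x : Int) (h : xs.Pairwise (· ≤ ·)) :
    ∀ L ∈ xs.take (PySem.List.bisectRight xs x), L ≤ x := by
  intro L hL
  obtain ⟨j, hj, rfl⟩ := List.getElem_of_mem hL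
  have hj2 : j < min (PySem.List.bisectRight xs x) xs.length := by
    simpa [List.length_take] using hj
  have hj' : j < xs.length := lt_of_lt_of_le hj2 (min_le_right _ _)
  rw [List.getElem_take]
  exact (PySem.List.bisectRight_spec xs x h).2.1 j hj' (lt_of_lt_of_le hj2 (min_le_left _ _))

theorem pvMem_take_bisect (xs : List Int) (x : Int) (h : xs.Pairwise (· ≤ ·))
    (L : Int) (hL : L ∈ xs) (hle : L ≤ x) : L ∈ xs.take (PySem.List.bisectRight xs x) := by
  obtain ⟨j, hj, rfl⟩ := List.getElem_of_mem hL
  have hjt : j < PySem.List.bisectRight xs x := by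
    by_contra hge
    exact absurd ((PySem.List.bisectRight_spec xs x h).2.2 j hj (le_of_not_gt hge)) (not_lt.mpr hle)
  have : xs[j] = (xs.take (PySem.List.bisectRight xs x))[j]'(by simp [List.length_take]; omega) := by
    rw [List.getElem_take]
  rw [this]
  exact List.getElem_mem _

theorem pvSliceToList (s : String) (i L : Int) (hi : 0 ≤ i) (hL : 0 ≤ L) :
    (PySem.Str.slice s (some i) (some (i + L))).toList =
      (s.toList.drop i.toNat).take L.toNat := by
  rw [PySem.Str.toList_slice, PySem.Chars.slice_eq_listSlice,
    PySem.List.slice_toNat _ hi (by omega)]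
  congr 1
  omega

-- f L = none when L has full-length slice longer than any match (or no key equals the slice)

theorem pvStep_eq (table : List (String × String)) (sentence : String) (i : Int)
    (hkeys : ∀ p ∈ table, p.1 ≠ "") (hi : 0 ≤ i) :
    pvMatchOneWord (pvSortedLens table) table sentence i =
      (pvBestMatch table sentence i).map (fun p => (p.1, p.2, i + PySem.Str.len p.1)) := by
  rw [pvBestMatch_eq_pvFL, pvMatchOneWord_def]
  cases hfl : pvFL sentence i table with
  | none =>
    simp only [Option.map_none]
    rw [List.findSome?_eq_none_iff]
    intro L hL
    cases hget : (PySem.Dict.mk table).get?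
        (PySem.Str.slice sentence (some i) (some (i + L))) with
    | none => rfl
    | some nw =>
      exfalso
      have hpair : (PySem.Str.slice sentence (some i) (some (i + L)), nw) ∈ table :=
        PySem.Dict.mem_items_of_get?_eq_some _ hget
      have hkey := hkeys _ hpair
      have hnone := (pvFL_eq_none_iff sentence i table).mp hfl _ hpair
      rw [List.mem_reverse] at hL
      have hLnn : 0 ≤ L := pvSortedLens_nonneg table L (List.mem_of_mem_take hL)
      have hmat : pvMatches sentence i
          (PySem.Str.slice sentence (some i) (some (i + L))) = true := by
        rw [pvMatches_iff]
        refine ⟨hkey, ?_⟩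
        rw [pvSliceToList sentence i L hi hLnn]
        exact List.take_prefix _ _
      rw [hmat] at hnone
      cases hnone
  | some pr =>
    simp only [Option.map_some]
    obtain ⟨hmem, hm, hmax⟩ := pvFL_eq_some sentence i table pr hfl
    rw [pvMatches_iff] at hm
    obtain ⟨hne, hpre⟩ := hm
    have hLmem : PySem.Str.len pr.1 ∈ pvSortedLens table :=
      (pvMem_sortedLens table _).mpr ⟨pr, hmem, rfl⟩
    have hplen : pr.1.toList.length ≤ sentence.toList.length - i.toNat := by
      have h1 := hpre.length_le
      rwa [List.length_drop] at h1
    have hplen1 : 1 ≤ pr.1.toList.length := by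
      have hnil : pr.1.toList ≠ [] := by
        intro h0
        exact hne (String.toList_inj.mp (by rw [h0]; rfl))
      have := List.length_pos_of_ne_nil hnil
      omega
    have hLR : PySem.Str.len pr.1 ≤ PySem.Str.len sentence - i := by
      rw [PySem.Str.len_eq, PySem.Str.len_eq]
      omega
    have hpw : (pvSortedLens table).Pairwise (· ≤ ·) :=
      (pvSortedLens_pairwise table).imp le_of_lt
    have hTake := pvMem_take_bisect (pvSortedLens table) (PySem.Str.len sentence - i) hpw
      (PySem.Str.len pr.1) hLmem hLR
    have hRev : PySem.Str.len pr.1 ∈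
        ((pvSortedLens table).take (PySem.List.bisectRight (pvSortedLens table)
          (PySem.Str.len sentence - i))).reverse := by
      rwa [List.mem_reverse]
    obtain ⟨pre, post, hsplit⟩ := List.append_of_mem hRev
    have hpw2 : (((pvSortedLens table).take (PySem.List.bisectRight (pvSortedLens table)
        (PySem.Str.len sentence - i))).reverse).Pairwise (· > ·) := by
      rw [List.pairwise_reverse]
      exact (pvSortedLens_pairwise table).sublist (List.take_sublist _ _)
    rw [hsplit]
    rw [List.findSome?_append]
    have hfull : ∀ L : Int, L ∈ (pvSortedLens table).take
        (PySem.List.bisectRight (pvSortedLens table) (PySem.Str.len sentence - i)) →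
        (PySem.Str.slice sentence (some i) (some (i + L))).toList.length = L.toNat := by
      intro L hLmem'
      have hLnn : 0 ≤ L := pvSortedLens_nonneg table L (List.mem_of_mem_take hLmem')
      have hLle : L ≤ PySem.Str.len sentence - i := pvTake_bisect_le _ _ hpw L hLmem'
      rw [pvSliceToList sentence i L hi hLnn]
      rw [List.length_take, List.length_drop]
      rw [PySem.Str.len_eq] at hLle
      omega
    have hprenone : pre.findSome? (fun L =>
        match (PySem.Dict.mk table).get? (PySem.Str.slice sentence (some i) (some (i + L))) with
        | some newWord => some (PySem.Str.slice sentence (some i) (some (i + L)), newWord, i + L)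
        | none => none) = none := by
      rw [List.findSome?_eq_none_iff]
      intro L hLpre
      have hLgt : PySem.Str.len pr.1 < L := by
        have := hpw2
        rw [hsplit] at this
        have h3 := (List.pairwise_append.mp this).2.2
        exact h3 L hLpre _ (List.mem_cons_self)
      have hLtake : L ∈ (pvSortedLens table).take (PySem.List.bisectRight (pvSortedLens table)
          (PySem.Str.len sentence - i)) := by
        rw [← List.mem_reverse, hsplit]
        exact List.mem_append_left _ hLpre
      cases hget : (PySem.Dict.mk table).get?
          (PySem.Str.slice sentence (some i) (some (i + L))) with
      | none => rfl
      | some nw =>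
        exfalso
        have hpair : (PySem.Str.slice sentence (some i) (some (i + L)), nw) ∈ table :=
          PySem.Dict.mem_items_of_get?_eq_some _ hget
        have hkey := hkeys _ hpair
        have hmat : pvMatches sentence i
            (PySem.Str.slice sentence (some i) (some (i + L))) = true := by
          rw [pvMatches_iff]
          refine ⟨hkey, ?_⟩
          rw [pvSliceToList sentence i L hi
            (pvSortedLens_nonneg table L (List.mem_of_mem_take hLtake))]
          exact List.take_prefix _ _
        have hlen := hmax _ hpair hmat
        dsimp only at hlen
        have hfl2 := hfull L hLtake
        have e3 : (PySem.Str.slice sentence (some i) (some (i + L))).toList.length =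
            (PySem.Str.slice sentence (some i) (some (i + L))).length := String.length_toList
        have e4 : pr.1.toList.length = pr.1.length := String.length_toList
        rw [PySem.Str.len_eq] at hLgt
        omega
    rw [hprenone, Option.none_or]
    rw [List.findSome?_cons]
    have hslice : PySem.Str.slice sentence (some i) (some (i + PySem.Str.len pr.1)) = pr.1 := by
      rw [← String.toList_inj]
      rw [pvSliceToList sentence i _ hi (by simp [PySem.Str.len_eq])]
      have ht : (PySem.Str.len pr.1).toNat = pr.1.toList.length := by
        simp [PySem.Str.len_eq]
      rw [ht]
      rw [List.prefix_iff_eq_take] at hpre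
      exact hpre.symm
    rw [hslice]
    rw [pvFL_first sentence i table pr hfl]

theorem pvBestMatch_none_of_ge (table : List (String × String)) (sentence : String) (i : Int)
    (h : PySem.Str.len sentence ≤ i) : pvBestMatch table sentence i = none := by
  rw [pvBestMatch_eq_pvFL, pvFL_eq_none_iff]
  intro p _
  rw [← Bool.not_eq_true, pvMatches_iff]
  rintro ⟨hne, hpre⟩
  have hdrop : sentence.toList.drop i.toNat = [] := by
    apply List.drop_eq_nil_of_le
    rw [PySem.Str.len_eq] at h
    omega
  rw [hdrop, List.prefix_nil] at hpre
  exact hne (String.toList_inj.mp (by rw [hpre]; rfl))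

theorem pvDtLoop_none (fuel : Nat) (ls : List Int) (table : List (String × String))
    (sentence : String) (olds news : List String) (i : Int)
    (h : pvMatchOneWord ls table sentence i = none) :
    pvDtLoop fuel ls table sentence olds news i = (olds, news, i) := by
  cases fuel with
  | zero => rfl
  | succ fuel => rw [pvDtLoop, h]

theorem pvAltLoop_stop (fuel : Nat) (table : List (String × String)) (sentence : String)
    (olds news : List String) (i : Int) (h : ¬(0 ≤ i ∧ i < PySem.Str.len sentence)) :
    pvAltLoop fuel table sentence olds news i = (olds, news, i) := by
  cases fuel with
  | zero => rfl
  | succ fuel => rw [pvAltLoop, if_neg h]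

theorem pvLoop_eq (table : List (String × String)) (sentence : String)
    (hkeys : ∀ p ∈ table, p.1 ≠ "") :
    ∀ (fuel : Nat) (olds news : List String) (i : Int), 0 ≤ i →
      pvDtLoop fuel (pvSortedLens table) table sentence olds news i =
        pvAltLoop fuel table sentence olds news i := by
  intro fuel
  induction fuel with
  | zero => intro olds news i _; rfl
  | succ fuel ih =>
    intro olds news i hi
    by_cases hc : 0 ≤ i ∧ i < PySem.Str.len sentence
    · rw [pvDtLoop, pvAltLoop, if_pos hc, pvStep_eq table sentence i hkeys hi]
      cases hbm : pvBestMatch table sentence i with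
      | none => rfl
      | some p =>
        simp only [Option.map_some]
        exact ih (olds ++ [p.1]) (news ++ [p.2]) (i + PySem.Str.len p.1)
          (by rw [PySem.Str.len_eq]; omega)
    · have hge : PySem.Str.len sentence ≤ i := by
        rcases not_and_or.mp hc with h | h
        · exact absurd hi h
        · omega
      rw [pvAltLoop_stop _ _ _ _ _ _ hc]
      apply pvDtLoop_none
      rw [pvStep_eq table sentence i hkeys hi, pvBestMatch_none_of_ge table sentence i hge]
      rfl

theorem pvMatchOneWord_none_of_big (table : List (String × String)) (sentence : String)
    (start : Int) (h : PySem.Str.len sentence < start) :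
    pvMatchOneWord (pvSortedLens table) table sentence start = none := by
  rw [pvMatchOneWord_def]
  have hpw : (pvSortedLens table).Pairwise (· ≤ ·) :=
    (pvSortedLens_pairwise table).imp le_of_lt
  have ht : PySem.List.bisectRight (pvSortedLens table) (PySem.Str.len sentence - start) = 0 := by
    by_contra h0
    have hpos : 0 < PySem.List.bisectRight (pvSortedLens table) (PySem.Str.len sentence - start) :=
      Nat.pos_of_ne_zero h0
    have hlen : 0 < (pvSortedLens table).length :=
      lt_of_lt_of_le hpos (PySem.List.bisectRight_spec _ _ hpw).1
    have := (PySem.List.bisectRight_spec _ _ hpw).2.1 0 hlen hpos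
    have hnn := pvSortedLens_nonneg table _ (List.getElem_mem hlen)
    omega
  rw [ht]
  rfl

theorem pvMatchOneWord_none_of_notD (table : List (String × String)) (sentence : String)
    (start : Int) (hst : start < 0)
    (hD : ¬ D_direct_translate table sentence start) :
    pvMatchOneWord (pvSortedLens table) table sentence start = none := by
  rw [pvMatchOneWord_def, List.findSome?_eq_none_iff]
  intro L hL
  rw [List.mem_reverse] at hL
  cases hget : (PySem.Dict.mk table).get?
      (PySem.Str.slice sentence (some start) (some (start + L))) with
  | none => rfl
  | some nw =>
    exfalso
    apply hD
    have hpair : (PySem.Str.slice sentence (some start) (some (start + L)), nw) ∈ table :=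
      PySem.Dict.mem_items_of_get?_eq_some _ hget
    have hLls : L ∈ pvSortedLens table := List.mem_of_mem_take hL
    obtain ⟨p2, hp2, hp2len⟩ := (pvMem_sortedLens table L).mp hLls
    have hpw : (pvSortedLens table).Pairwise (· ≤ ·) :=
      (pvSortedLens_pairwise table).imp le_of_lt
    have hLR : L ≤ PySem.Str.len sentence - start := pvTake_bisect_le _ _ hpw L hL
    exact ⟨hst, _, hpair, p2, hp2, by rw [hp2len]; exact hLR, by rw [hp2len]⟩

theorem pvMatchOneWord_some_of_D (table : List (String × String)) (sentence : String)
    (start : Int) (hD : D_direct_translate table sentence start) :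
    pvMatchOneWord (pvSortedLens table) table sentence start ≠ none := by
  obtain ⟨hst, p1, hp1, p2, hp2, hle, hslice⟩ := hD
  rw [pvMatchOneWord_def, Ne, List.findSome?_eq_none_iff]
  intro hall
  have hLls : PySem.Str.len p2.1 ∈ pvSortedLens table := (pvMem_sortedLens table _).mpr ⟨p2, hp2, rfl⟩
  have hpw : (pvSortedLens table).Pairwise (· ≤ ·) :=
    (pvSortedLens_pairwise table).imp le_of_lt
  have hTake := pvMem_take_bisect (pvSortedLens table) (PySem.Str.len sentence - start) hpw
    (PySem.Str.len p2.1) hLls hle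
  have := hall (PySem.Str.len p2.1) (by rwa [List.mem_reverse])
  rw [hslice] at this
  have hget : (PySem.Dict.mk table).get? p1.1 ≠ none := by
    intro hg0
    rw [PySem.Dict.get?_eq_none_iff_not_mem_keys] at hg0
    exact hg0 (by rw [PySem.Dict.keys_mk]; exact List.mem_map_of_mem hp1)
  cases hg : (PySem.Dict.mk table).get? p1.1 with
  | none => exact hget hg
  | some nw => rw [hg] at this; cases this

theorem pvDtLoop_fst_prefix (fuel : Nat) (ls : List Int) (table : List (String × String))
    (sentence : String) : ∀ (olds news : List String) (i : Int),
    ∃ r, (pvDtLoop fuel ls table sentence olds news i).1 = olds ++ r := by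
  induction fuel with
  | zero => intro olds news i; exact ⟨[], by simp [pvDtLoop]⟩
  | succ fuel ih =>
    intro olds news i
    rw [pvDtLoop]
    cases hm : pvMatchOneWord ls table sentence i with
    | none => exact ⟨[], by simp⟩
    | some r =>
      obtain ⟨o, nw, s'⟩ := r
      obtain ⟨rest, hrest⟩ := ih (olds ++ [o]) (news ++ [nw]) s'
      exact ⟨[o] ++ rest, by simp [hrest]⟩

theorem dt_spec (translation_table : List (String × String)) (sentence : String) (start : Int)
    (hpre : Pre_direct_translate translation_table sentence start)
    (hnD : ¬ D_direct_translate translation_table sentence start) :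
    direct_translate translation_table sentence start =
      direct_translate_alt translation_table sentence start := by
  unfold direct_translate direct_translate_alt
  by_cases hst : 0 ≤ start
  · by_cases hk : ∀ p ∈ translation_table, p.1 ≠ ""
    · exact pvLoop_eq translation_table sentence hk _ [] [] start hst
    · rcases hpre with h | h
      · exact absurd h hk
      · rw [pvDtLoop_none _ _ _ _ _ _ _ (pvMatchOneWord_none_of_big translation_table sentence start h)]
        rw [pvAltLoop_stop _ _ _ _ _ _ (by rintro ⟨_, h2⟩; omega)]
  · replace hst := lt_of_not_ge hst
    rw [pvDtLoop_none _ _ _ _ _ _ _ (pvMatchOneWord_none_of_notD translation_table sentence start hst hnD)]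
    rw [pvAltLoop_stop _ _ _ _ _ _ (by rintro ⟨h1, _⟩; omega)]

theorem dt_tight (translation_table : List (String × String)) (sentence : String) (start : Int)
    (hD : D_direct_translate translation_table sentence start) :
    direct_translate translation_table sentence start ≠
      direct_translate_alt translation_table sentence start := by
  have hst := hD.1
  have hA := pvMatchOneWord_some_of_D translation_table sentence start hD
  unfold direct_translate direct_translate_alt
  rw [pvAltLoop_stop _ _ _ _ _ _ (by rintro ⟨h1, _⟩; omega)]
  cases hm : pvMatchOneWord (pvSortedLens translation_table) translation_table sentence start with
  | none => exact absurd hm hA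
  | some r =>
    obtain ⟨o, nw, s2⟩ := r
    intro heq
    have hstep : pvDtLoop ((PySem.Str.len sentence).toNat + start.natAbs + 2)
        (pvSortedLens translation_table) translation_table sentence [] [] start =
        pvDtLoop ((PySem.Str.len sentence).toNat + start.natAbs + 1)
          (pvSortedLens translation_table) translation_table sentence [o] [nw] s2 := by
      rw [pvDtLoop, hm]
      rfl
    rw [hstep] at heq
    obtain ⟨rest, hrest⟩ := pvDtLoop_fst_prefix ((PySem.Str.len sentence).toNat + start.natAbs + 1)
      (pvSortedLens translation_table) translation_table sentence [o] [nw] s2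
    rw [heq] at hrest
    simp at hrest

-- ===== VERDICT (by name: the statement is the Claim_ definition above) =====
theorem direct_translate_spec : Claim_unchanged_direct_translate := by
  intro translation_table sentence start _ hpre hnD
  exact dt_spec translation_table sentence start hpre hnD

theorem direct_translate_changed : Claim_changed_direct_translate := by
  unfold Claim_changed_direct_translate; decide

theorem direct_translate_tight : Claim_exact_direct_translate := by
  intro translation_table sentence start _ _ hD
  exact dt_tight translation_table sentence start hD
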